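-- pv_equiv track=rewrite | github.com/TurtleTools/caretta | evaluation/benchmark_paper.py | get_seq_dict_from_pair
-- ===== SOURCE A (Python) =====
-- def get_seq_dict_from_pair(ref_pair):
--     c = 0
--     ref_alignment = dict()
--     d = 0
--     double_indices = dict()
--     for i in range(len(ref_pair[0])):
--         if (ref_pair[0][i] != "-") and (ref_pair[1][i] != "-"):
--             ref_alignment[c] = (ref_pair[0][i], ref_pair[1][i])
--             double_indices[c] = d
--             d += 1
--             c += 1
--         elif ref_pair[0][i] != "-":
--             c += 1
--         else:
--             continue
--     return ref_alignment, double_indices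
-- ===== SOURCE B (Python) =====
-- def get_seq_dict_from_pair(ref_pair):
--     s0, s1 = ref_pair[0], ref_pair[1]
--     n = len(s0)
--     # prefix-count tables: res[i] = residue columns of s0 before i,
--     # both[i] = doubly-matched columns before i; no running counters afterwards.
--     res = [0]
--     both = [0]
--     for i in range(n):
--         r = s0[i] != "-"
--         res.append(res[i] + (1 if r else 0))
--         both.append(both[i] + (1 if r and s1[i] != "-" else 0))
--     # a column i is matched exactly when `both` steps at i; its key is res[i]
--     # and its double index is both[i] (closed-form, read off the tables).
--     ref_alignment = {res[i]: (s0[i], s1[i]) for i in range(n) if both[i + 1] > both[i]}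
--     double_indices = {res[i]: both[i] for i in range(n) if both[i + 1] > both[i]}
--     return ref_alignment, double_indices
-- ===== Notes on version B (the rewrite author's own statement) =====
-- stated objective: alternative
-- what changed: Replaces A's single fused loop with three running counters and in-loop dict insertion by a different algorithm: one pass builds prefix-count tables res/both, then two dict comprehensions read the matched columns and their keys and double-indices off the tables in closed form (key = res[i], double index = both[i], matched iff both steps at i), with no counters at all.
import Mathlib
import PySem

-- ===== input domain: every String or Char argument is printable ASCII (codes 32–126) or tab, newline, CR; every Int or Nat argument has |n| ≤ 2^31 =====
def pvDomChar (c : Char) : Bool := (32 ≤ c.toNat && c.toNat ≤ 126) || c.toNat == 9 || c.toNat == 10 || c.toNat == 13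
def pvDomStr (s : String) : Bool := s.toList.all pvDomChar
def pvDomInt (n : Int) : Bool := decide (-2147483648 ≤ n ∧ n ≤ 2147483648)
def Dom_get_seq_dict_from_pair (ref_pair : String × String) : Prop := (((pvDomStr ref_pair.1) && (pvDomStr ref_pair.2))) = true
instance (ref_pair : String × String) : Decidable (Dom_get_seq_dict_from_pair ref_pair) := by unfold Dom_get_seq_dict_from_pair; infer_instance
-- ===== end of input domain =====

-- B replaces A's fused counter loop by prefix-count tables read off afterwards by two dict
-- comprehensions whose keys are closed-form counts; same asymptotic cost ("alternative").

-- ===== PORT A =====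
-- A's loop body: state (c, ref_alignment, d, double_indices); the .getD '-' totalizes the
-- two character reads (Pre_ guarantees Python's reads succeed wherever the value matters).
def pvStepA (s0 s1 : List Char)
    (st : Int × PySem.Dict Int (String × String) × Int × PySem.Dict Int Int) (i : Int) :
    Int × PySem.Dict Int (String × String) × Int × PySem.Dict Int Int :=
  let a := (PySem.Chars.pyGet? s0 i).getD '-'
  let b := (PySem.Chars.pyGet? s1 i).getD '-'
  if a ≠ '-' ∧ b ≠ '-' then
    (st.1 + 1, PySem.Dict.insert st.2.1 st.1 (String.ofList [a], String.ofList [b]),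
     st.2.2.1 + 1, PySem.Dict.insert st.2.2.2 st.1 st.2.2.1)
  else if a ≠ '-' then (st.1 + 1, st.2.1, st.2.2.1, st.2.2.2)
  else st

def get_seq_dict_from_pair (ref_pair : String × String) : (List (Int × String × String)) × (List (Int × Int)) :=
  let st := (PySem.List.pyRange 0 (PySem.Str.len ref_pair.1) 1).foldl
      (pvStepA ref_pair.1.toList ref_pair.2.toList)
      (0, PySem.Dict.empty, 0, PySem.Dict.empty)
  (st.2.1.items, st.2.2.2.items)

-- ===== PORT B =====
-- B's first loop: append one entry to each prefix-count table (res, both); the .getD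
-- totalizes the reads exactly as in A's port.
def pvStepTab (s0 s1 : List Char) (st : List Int × List Int) (i : Int) : List Int × List Int :=
  let r := (PySem.Chars.pyGet? s0 i).getD '-' ≠ '-'
  (st.1 ++ [PySem.List.pyGetD st.1 i 0 + if r then 1 else 0],
   st.2 ++ [PySem.List.pyGetD st.2 i 0 +
            if r ∧ (PySem.Chars.pyGet? s1 i).getD '-' ≠ '-' then 1 else 0])

def get_seq_dict_from_pair_alt (ref_pair : String × String) : (List (Int × String × String)) × (List (Int × Int)) :=
  let s0 := ref_pair.1.toList
  let s1 := ref_pair.2.toList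
  let n := PySem.Str.len ref_pair.1
  let tabs := (PySem.List.pyRange 0 n 1).foldl (pvStepTab s0 s1) ([0], [0])
  -- the two dict comprehensions, each a filtered fold over range(n) reading the tables
  let ra := (PySem.List.pyRange 0 n 1).foldl (fun d i =>
      if PySem.List.pyGetD tabs.2 (i + 1) 0 > PySem.List.pyGetD tabs.2 i 0 then
        PySem.Dict.insert d (PySem.List.pyGetD tabs.1 i 0)
          (String.ofList [(PySem.Chars.pyGet? s0 i).getD '-'],
           String.ofList [(PySem.Chars.pyGet? s1 i).getD '-'])
      else d) PySem.Dict.empty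
  let di := (PySem.List.pyRange 0 n 1).foldl (fun d i =>
      if PySem.List.pyGetD tabs.2 (i + 1) 0 > PySem.List.pyGetD tabs.2 i 0 then
        PySem.Dict.insert d (PySem.List.pyGetD tabs.1 i 0) (PySem.List.pyGetD tabs.2 i 0)
      else d) PySem.Dict.empty
  (ra.items, di.items)

-- ===== PRECONDITION & SPEC =====
-- Pre_ excludes exactly the inputs where Python A raises IndexError: a column where the first
-- sequence has a residue but the second sequence is too short (B raises there as well).
def Pre_get_seq_dict_from_pair (ref_pair : String × String) : Prop :=
  ∀ i ∈ List.range ref_pair.1.toList.length,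
    ref_pair.1.toList.getD i '-' ≠ '-' → i < ref_pair.2.toList.length
instance (ref_pair : String × String) : Decidable (Pre_get_seq_dict_from_pair ref_pair) := by
  unfold Pre_get_seq_dict_from_pair; infer_instance

def pvWitness_get_seq_dict_from_pair : (String × String) := ("AB-C", "A-xC")

def Spec_get_seq_dict_from_pair (ref_pair : String × String) (out : (List (Int × String × String)) × (List (Int × Int))) : Prop := out = get_seq_dict_from_pair_alt ref_pair
instance (ref_pair : String × String) (out : (List (Int × String × String)) × (List (Int × Int))) : Decidable (Spec_get_seq_dict_from_pair ref_pair out) := by unfold Spec_get_seq_dict_from_pair; infer_instance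

-- ===== CLAIM (what is proved, stated in full; the proofs are below) =====
def Claim_equal_get_seq_dict_from_pair : Prop := ∀ (ref_pair : String × String), Dom_get_seq_dict_from_pair ref_pair → Pre_get_seq_dict_from_pair ref_pair → Spec_get_seq_dict_from_pair ref_pair (get_seq_dict_from_pair ref_pair)

-- ===== LEMMAS AND PROOFS =====

-- the abstract contents of B's tables: residue / double-match counts of the first k columns
def pvCntR (s0 : List Char) (k : Nat) : Int :=
  ((List.range k).countP (fun j => decide (s0[j]?.getD '-' ≠ '-')) : Int)
def pvCntB (s0 s1 : List Char) (k : Nat) : Int :=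
  ((List.range k).countP (fun j => decide (s0[j]?.getD '-' ≠ '-' ∧ s1[j]?.getD '-' ≠ '-')) : Int)

lemma pvCntR_succ (s0 : List Char) (k : Nat) :
    pvCntR s0 (k + 1) = pvCntR s0 k + (if s0[k]?.getD '-' ≠ '-' then 1 else 0) := by
  simp [pvCntR, List.range_succ, List.countP_append]

lemma pvCntB_succ (s0 s1 : List Char) (k : Nat) :
    pvCntB s0 s1 (k + 1) = pvCntB s0 s1 k +
      (if s0[k]?.getD '-' ≠ '-' ∧ s1[k]?.getD '-' ≠ '-' then 1 else 0) := by
  simp [pvCntB, List.range_succ, List.countP_append]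

-- B's first loop builds exactly the two count tables
lemma pv_tab (s0 s1 : List Char) (n : Nat) :
    (PySem.List.pyRange 0 (n : Int) 1).foldl (pvStepTab s0 s1) ([0], [0])
    = ((List.range (n + 1)).map (fun k => pvCntR s0 k),
       (List.range (n + 1)).map (fun k => pvCntB s0 s1 k)) := by
  induction n with
  | zero => simp [pvCntR, pvCntB]
  | succ n ih =>
    have hsplit : PySem.List.pyRange 0 ((n + 1 : Nat) : Int) 1
        = PySem.List.pyRange 0 (n : Int) 1 ++ [(n : Int)] := by
      push_cast
      exact PySem.List.pyRange_one_succ_right (by positivity)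
    rw [hsplit, List.foldl_append, ih]
    simp only [List.foldl_cons, List.foldl_nil, pvStepTab, PySem.List.pyGetD_natCast,
      PySem.List.getD_map_range _ _ _ _ (Nat.lt_succ_self n),
      List.range_succ (n := n + 1), List.map_append, List.map_cons, List.map_nil]
    rw [pvCntR_succ, pvCntB_succ]
    simp only [PySem.Chars.pyGet?_eq_listPyGet?, PySem.List.pyGet?_natCast]

-- A's fused loop computes the counts and the two dicts of the count-based filtered folds
lemma pv_main (s0 s1 : List Char) (n : Nat) :
    (PySem.List.pyRange 0 (n : Int) 1).foldl (pvStepA s0 s1)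
        (0, PySem.Dict.empty, 0, PySem.Dict.empty)
    = (pvCntR s0 n,
       (PySem.List.pyRange 0 (n : Int) 1).foldl (fun d i =>
          if pvCntB s0 s1 (i.toNat + 1) > pvCntB s0 s1 i.toNat then
            PySem.Dict.insert d (pvCntR s0 i.toNat)
              (String.ofList [(PySem.Chars.pyGet? s0 i).getD '-'],
               String.ofList [(PySem.Chars.pyGet? s1 i).getD '-'])
          else d) PySem.Dict.empty,
       pvCntB s0 s1 n,
       (PySem.List.pyRange 0 (n : Int) 1).foldl (fun d i =>
          if pvCntB s0 s1 (i.toNat + 1) > pvCntB s0 s1 i.toNat then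
            PySem.Dict.insert d (pvCntR s0 i.toNat) (pvCntB s0 s1 i.toNat)
          else d) PySem.Dict.empty) := by
  induction n with
  | zero => simp [pvCntR, pvCntB]
  | succ n ih =>
    have hsplit : PySem.List.pyRange 0 ((n + 1 : Nat) : Int) 1
        = PySem.List.pyRange 0 (n : Int) 1 ++ [(n : Int)] := by
      push_cast
      exact PySem.List.pyRange_one_succ_right (by positivity)
    rw [hsplit, List.foldl_append, List.foldl_append, List.foldl_append, ih]
    simp only [List.foldl_cons, List.foldl_nil, pvStepA,
      PySem.Chars.pyGet?_eq_listPyGet?, PySem.List.pyGet?_natCast, Int.toNat_natCast,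
      pvCntR_succ, pvCntB_succ]
    by_cases ha : s0[n]?.getD '-' = '-'
    · simp [ha]
    · by_cases hb : s1[n]?.getD '-' = '-'
      · simp [ha, hb]
      · simp [ha, hb]

-- ===== VERDICT (by name: the statement is the Claim_ definition above) =====
theorem get_seq_dict_from_pair_spec : Claim_equal_get_seq_dict_from_pair := by
  intro ref_pair _ _
  unfold Spec_get_seq_dict_from_pair get_seq_dict_from_pair get_seq_dict_from_pair_alt
  dsimp only
  rw [PySem.Str.len_eq, pv_tab ref_pair.1.toList ref_pair.2.toList ref_pair.1.toList.length]
  rw [pv_main ref_pair.1.toList ref_pair.2.toList ref_pair.1.toList.length]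
  have hget : ∀ (f : Nat → Int) (i : Int), 0 ≤ i → i < (ref_pair.1.toList.length : Int) + 1 →
      PySem.List.pyGetD ((List.range (ref_pair.1.toList.length + 1)).map f) i 0 = f i.toNat := by
    intro f i h0 h1
    rw [PySem.List.pyGetD_of_nonneg _ _ h0, PySem.List.getD_map_range]
    omega
  refine Prod.ext ?_ ?_ <;> dsimp only <;>
    refine congrArg PySem.Dict.items (PySem.List.foldl_congr_mem _ _ _ _ (fun acc i hi => ?_)) <;>
    obtain ⟨h0, h1⟩ := (PySem.List.mem_pyRange_one).1 hi <;>
    rw [hget _ i h0 (by omega), hget _ (i + 1) (by omega) (by omega),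
        hget (fun k => pvCntR ref_pair.1.toList k) i h0 (by omega),
        show (i + 1).toNat = i.toNat + 1 by omega]
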